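-- pv_equiv track=rewrite | github.com/raulpenaguiao/project-euler | archive/Euler02__/Euler242/Euler242.py | F
-- ===== SOURCE A (Python) =====
-- def digits(n, base = 2):
--     if n < base:
--         return [n]
--     return digits(n//base, base) + [n%base]
--
-- def F(m):
--     n = (m-1)//4 + 1
--     digs = digits(n)
--     l = len(digs)
--     ans = 0
--     pow2 = 1
--     for i in range(l):
--         if digs[i] == 1:
--             ans += 3**(l-i-1)*pow2
--             pow2 *= 2
--     return ans
-- ===== SOURCE B (Python) =====
-- def _msb_sum(n):
--     if n < 1:
--         return 0
--     b = n.bit_length() - 1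
--     return 3 ** b + 2 * _msb_sum(n - (1 << b))
--
-- def F(m):
--     n = (m - 1) // 4 + 1
--     return _msb_sum(n)
-- ===== Notes on version B (the rewrite author's own statement) =====
-- stated objective: simpler
-- what changed: Instead of materialising the binary digit list and summing over its indices with a running power-of-two weight, B recurses directly on the numeric value, stripping the most significant set bit per step (its position gives the power of three, the tail is doubled); nonpositive values yield zero as in A.
import Mathlib
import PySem

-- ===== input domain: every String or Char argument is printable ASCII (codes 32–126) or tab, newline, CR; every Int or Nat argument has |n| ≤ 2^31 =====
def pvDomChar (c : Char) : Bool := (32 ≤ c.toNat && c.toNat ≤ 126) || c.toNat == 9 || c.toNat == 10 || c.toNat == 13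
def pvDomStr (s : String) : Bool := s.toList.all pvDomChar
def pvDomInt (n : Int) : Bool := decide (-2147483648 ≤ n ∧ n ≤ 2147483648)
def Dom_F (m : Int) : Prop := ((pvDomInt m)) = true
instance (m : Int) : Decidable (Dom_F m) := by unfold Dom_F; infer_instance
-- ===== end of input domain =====

-- B replaces A's digit-list + indexed loop by a recursion stripping the most significant set bit (simpler decomposition, same values).

-- ===== PORT A =====
-- digits(n, base=2): in A it is only ever called with base = 2, ported with that base.
def digitsA (n : Int) : List Int :=
  if n < 2 then [n]
  else digitsA (PySem.Int.floordiv n 2) ++ [PySem.Int.mod n 2]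
termination_by n.toNat
decreasing_by
  have h2 : (0:Int) < 2 := by norm_num
  have := PySem.Int.floordiv_eq_ediv_of_pos (a := n) h2
  omega

def F (m : Int) : Int :=
  let n := PySem.Int.floordiv (m - 1) 4 + 1
  let digs := digitsA n
  let l := digs.length
  -- for i in range(l): indices are 0..l-1, always in range, so getD's default is never used
  let s := (List.range l).foldl
    (fun (s : Int × Int) i =>
      if digs.getD i 0 = 1 then (s.1 + 3 ^ (l - i - 1) * s.2, s.2 * 2) else s) (0, 1)
  s.1

-- ===== PORT B =====
def msbSum (n : Int) : Int :=
  if n < 1 then 0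
  else
    let b := PySem.Int.bitLength n - 1
    3 ^ b + 2 * msbSum (n - 2 ^ b)
termination_by n.toNat
decreasing_by
  have h2 : 1 ≤ 2 ^ (PySem.Int.bitLength n - 1) := Nat.one_le_two_pow
  have h3 : ((2:Int) ^ (PySem.Int.bitLength n - 1)) = ((2 ^ (PySem.Int.bitLength n - 1) : Nat) : Int) := by push_cast; ring
  omega

def F_alt (m : Int) : Int :=
  let n := PySem.Int.floordiv (m - 1) 4 + 1
  msbSum n

-- ===== PRECONDITION & SPEC =====
def Spec_F (m : Int) (out : Int) : Prop := out = F_alt m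
instance (m : Int) (out : Int) : Decidable (Spec_F m out) := by unfold Spec_F; infer_instance

-- ===== CLAIM (what is proved, stated in full; the proofs are below) =====
def Claim_equal_F : Prop := ∀ (m : Int), Dom_F m → Spec_F m (F m)

-- ===== LEMMAS AND PROOFS =====

-- MSB-first weight of a digit list: what A's loop computes.
def WI : List Int → Int
  | [] => 0
  | d :: t => if d = 1 then 3 ^ t.length + 2 * WI t else WI t

theorem WI_append (ds : List Int) (d : Int) :
    WI (ds ++ [d]) = 3 * WI ds + (if d = 1 then 2 ^ (ds.count 1) else 0) := by
  induction ds with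
  | nil =>
    by_cases hd : d = 1 <;> simp [WI, hd]
  | cons e t ih =>
    simp only [List.cons_append, WI, List.length_append, List.length_cons,
      List.length_nil, List.count_cons, ih]
    by_cases he : e = 1 <;> by_cases hd : d = 1 <;>
      simp [he, hd, pow_succ] <;> ring

theorem loop_eq (ds : List Int) (a p : Int) :
    (List.range ds.length).foldl
      (fun (s : Int × Int) i =>
        if ds.getD i 0 = 1 then (s.1 + 3 ^ (ds.length - i - 1) * s.2, s.2 * 2) else s) (a, p)
      = (a + p * WI ds, p * 2 ^ (ds.count 1)) := by
  induction ds generalizing a p with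
  | nil => simp [WI]
  | cons d t ih =>
    have hlen : (d :: t).length = t.length + 1 := by simp
    rw [hlen, List.range_succ_eq_map, List.foldl_cons, List.foldl_map]
    have hstep : ∀ (s : Int × Int) (i : Nat),
        (if (d :: t).getD (Nat.succ i) 0 = 1 then
          (s.1 + 3 ^ (t.length + 1 - Nat.succ i - 1) * s.2, s.2 * 2) else s)
        = (if t.getD i 0 = 1 then (s.1 + 3 ^ (t.length - i - 1) * s.2, s.2 * 2) else s) := by
      intro s i
      simp [Nat.succ_sub_succ]
    simp only [hstep]
    by_cases hd : d = 1
    · simp only [hd, List.getD_cons_zero, Nat.add_sub_cancel, Nat.sub_zero]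
      rw [ih]
      simp only [WI, List.count_cons_self, if_pos trivial, Prod.mk.injEq]
      refine ⟨by ring, ?_⟩
      rw [pow_succ]; ring
    · simp only [List.getD_cons_zero, if_neg hd]
      rw [ih]
      simp [WI, hd]

theorem digitsA_rec (n : Int) (h : 2 ≤ n) :
    digitsA n = digitsA (PySem.Int.floordiv n 2) ++ [PySem.Int.mod n 2] := by
  rw [digitsA, if_neg (by omega : ¬ n < 2)]

-- popcount as seen through A's digit list
def pcI (n : Int) : Nat := (digitsA n).count 1

theorem digitsA_small (n : Int) (h : n < 2) : digitsA n = [n] := by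
  rw [digitsA, if_pos h]

theorem divmod2 (n : Int) :
    PySem.Int.floordiv n 2 * 2 + PySem.Int.mod n 2 = n ∧
    0 ≤ PySem.Int.mod n 2 ∧ PySem.Int.mod n 2 < 2 :=
  ⟨PySem.Int.floordiv_mul_add_mod n 2,
   PySem.Int.mod_nonneg n (by norm_num), PySem.Int.mod_lt n (by norm_num)⟩

theorem floordiv2_eq (q b : Int) (hb0 : 0 ≤ b) (hb1 : b < 2) :
    PySem.Int.floordiv (2 * q + b) 2 = q := by
  rw [PySem.Int.floordiv_eq_iff_of_pos (by norm_num)]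
  constructor <;> nlinarith

theorem mod2_eq (q b : Int) (hb0 : 0 ≤ b) (hb1 : b < 2) :
    PySem.Int.mod (2 * q + b) 2 = b := by
  have h := PySem.Int.floordiv_mul_add_mod (2 * q + b) 2
  rw [floordiv2_eq q b hb0 hb1] at h
  omega

theorem bitLength_pos (n : Int) (h : 1 ≤ n) : 1 ≤ PySem.Int.bitLength n := by
  rw [PySem.Int.bitLength_of_pos (by omega)]; omega

theorem two_pow_le (n : Int) (h : 1 ≤ n) :
    (2 : Int) ^ (PySem.Int.bitLength n - 1) ≤ n := by
  have h1 := PySem.Int.two_pow_bitLength_le n (by omega)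
  have h2 : ((2 ^ (PySem.Int.bitLength n - 1) : Nat) : Int) ≤ (n.natAbs : Int) := by
    exact_mod_cast h1
  rw [Int.natAbs_of_nonneg (by omega)] at h2
  push_cast at h2
  exact h2

theorem bitLength_double (q b : Int) (hq : 1 ≤ q) (hb0 : 0 ≤ b) (hb1 : b < 2) :
    PySem.Int.bitLength (2 * q + b) = PySem.Int.bitLength q + 1 := by
  rw [PySem.Int.bitLength_of_pos (by omega), floordiv2_eq q b hb0 hb1]

theorem pc_cons (n : Int) (h : 2 ≤ n) :
    pcI n = pcI (PySem.Int.floordiv n 2) + (if PySem.Int.mod n 2 = 1 then 1 else 0) := by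
  unfold pcI
  rw [digitsA_rec n h, List.count_append]
  simp [List.count_cons]

-- pc n = pc (n - 2^(bitLength n - 1)) + 1 for n ≥ 1 (stripping the MSB removes one set bit)
theorem pc_msb_aux (k : Nat) :
    ∀ n : Int, n.toNat ≤ k → 1 ≤ n →
      pcI n = pcI (n - 2 ^ (PySem.Int.bitLength n - 1)) + 1 := by
  induction k with
  | zero => intro n hk h1; omega
  | succ k ih =>
    intro n hk h1
    by_cases hn2 : n < 2
    · -- n = 1
      have hn : n = 1 := by omega
      subst hn
      have h : PySem.Int.bitLength (1 : Int) = 1 := by decide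
      rw [h]
      norm_num
      unfold pcI
      rw [digitsA_small 1 (by norm_num), digitsA_small 0 (by norm_num)]
      decide
    · set q := PySem.Int.floordiv n 2 with hq
      set b := PySem.Int.mod n 2 with hb
      obtain ⟨hsum, hb0, hb1⟩ := divmod2 n
      have hq1 : 1 ≤ q := by omega
      have hn' : n = 2 * q + b := by omega
      have hbL : PySem.Int.bitLength n = PySem.Int.bitLength q + 1 := by
        rw [hn']; exact bitLength_double q b hq1 hb0 hb1
      have hbLq := bitLength_pos q hq1
      have hpow : (2 : Int) ^ (PySem.Int.bitLength n - 1) =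
          2 * 2 ^ (PySem.Int.bitLength q - 1) := by
        rw [hbL]
        have h : PySem.Int.bitLength q + 1 - 1 = (PySem.Int.bitLength q - 1) + 1 := by omega
        rw [h, pow_succ]; ring
      set rq : Int := q - 2 ^ (PySem.Int.bitLength q - 1) with hrq
      have hr : n - 2 ^ (PySem.Int.bitLength n - 1) = 2 * rq + b := by
        rw [hpow, hrq]; omega
      have hrq0 : 0 ≤ rq := by
        have := two_pow_le q hq1; omega
      have hihq : pcI q = pcI rq + 1 := by
        apply ih q (by omega) hq1
      have hpcn : pcI n = pcI q + (if b = 1 then 1 else 0) := by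
        rw [pc_cons n (by omega), ← hq, ← hb]
      by_cases hrz : rq = 0
      · -- remainder 0: the stripped number is just the digit b
        rw [hr, hrz]
        have : (2 : Int) * 0 + b = b := by ring
        rw [this]
        have hpcb : pcI b = if b = 1 then 1 else 0 := by
          unfold pcI
          rw [digitsA_small b (by omega)]
          by_cases hb' : b = 1 <;> simp [hb']
        have hpc0 : pcI 0 = 0 := by
          unfold pcI; rw [digitsA_small 0 (by norm_num)]; decide
        rw [hpcb, hpcn, hihq, hrz, hpc0]
        omega
      · have hrq1 : 1 ≤ rq := by omega
        rw [hr]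
        have hpcr : pcI (2 * rq + b) = pcI rq + (if b = 1 then 1 else 0) := by
          rw [pc_cons (2 * rq + b) (by omega), floordiv2_eq rq b hb0 hb1,
            mod2_eq rq b hb0 hb1]
        rw [hpcr, hpcn, hihq]
        omega

theorem pc_msb (n : Int) (h1 : 1 ≤ n) :
    pcI n = pcI (n - 2 ^ (PySem.Int.bitLength n - 1)) + 1 :=
  pc_msb_aux n.toNat n le_rfl h1

theorem msbSum_step (n : Int) (h : 1 ≤ n) :
    msbSum n = 3 ^ (PySem.Int.bitLength n - 1) +
      2 * msbSum (n - 2 ^ (PySem.Int.bitLength n - 1)) := by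
  rw [msbSum, if_neg (by omega : ¬ n < 1)]

theorem msbSum_nonpos (n : Int) (h : n < 1) : msbSum n = 0 := by
  rw [msbSum, if_pos h]

-- msbSum satisfies A's LSB recurrence (even and odd step), proved by strong induction
theorem msbSum_even_odd_aux (k : Nat) :
    ∀ m : Int, m.toNat ≤ k →
      (1 ≤ m → msbSum (2 * m) = 3 * msbSum m) ∧
      (0 ≤ m → msbSum (2 * m + 1) = 3 * msbSum m + 2 ^ (pcI m)) := by
  induction k with
  | zero =>
    intro m hk
    constructor
    · intro h1; omega
    · intro h0
      have hm : m = 0 := by omega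
      subst hm
      have h1 : msbSum (2 * 0 + 1) = 1 := by
        have he : (2 : Int) * 0 + 1 = 1 := by ring
        rw [he, msbSum_step 1 (by norm_num)]
        have hb : PySem.Int.bitLength (1 : Int) = 1 := by decide
        rw [hb]
        norm_num
        exact msbSum_nonpos 0 (by norm_num)
      have hpc0 : pcI 0 = 0 := by
        unfold pcI; rw [digitsA_small 0 (by norm_num)]; decide
      rw [h1, hpc0, msbSum_nonpos 0 (by norm_num)]
      ring
  | succ k ih =>
    intro m hk
    by_cases hm0 : m ≤ 0
    · constructor
      · intro h1; omega
      · intro h0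
        have hm : m = 0 := by omega
        subst hm
        exact ((ih 0 (by omega)).2 (by norm_num))
    · have hm1 : 1 ≤ m := by omega
      have hbLm := bitLength_pos m hm1
      set rm : Int := m - 2 ^ (PySem.Int.bitLength m - 1) with hrm
      have hrm0 : 0 ≤ rm := by have := two_pow_le m hm1; omega
      have hrmlt : rm < m := by
        have : (0:Int) < 2 ^ (PySem.Int.bitLength m - 1) := by positivity
        omega
      have hbLe : PySem.Int.bitLength (2 * m) = PySem.Int.bitLength m + 1 := by
        have h := bitLength_double m 0 hm1 (by norm_num) (by norm_num)
        rw [show (2:Int) * m + 0 = 2 * m by ring] at h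
        exact h
      have hbLo : PySem.Int.bitLength (2 * m + 1) = PySem.Int.bitLength m + 1 :=
        bitLength_double m 1 hm1 (by norm_num) (by norm_num)
      have hpowe : (2 : Int) ^ (PySem.Int.bitLength (2 * m) - 1) =
          2 * 2 ^ (PySem.Int.bitLength m - 1) := by
        rw [hbLe]
        have : PySem.Int.bitLength m + 1 - 1 = (PySem.Int.bitLength m - 1) + 1 := by omega
        rw [this, pow_succ]; ring
      have hpowo : (2 : Int) ^ (PySem.Int.bitLength (2 * m + 1) - 1) =
          2 * 2 ^ (PySem.Int.bitLength m - 1) := by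
        rw [hbLo]
        have : PySem.Int.bitLength m + 1 - 1 = (PySem.Int.bitLength m - 1) + 1 := by omega
        rw [this, pow_succ]; ring
      have hpow3e : (3 : Int) ^ (PySem.Int.bitLength (2 * m) - 1) =
          3 * 3 ^ (PySem.Int.bitLength m - 1) := by
        rw [hbLe]
        have : PySem.Int.bitLength m + 1 - 1 = (PySem.Int.bitLength m - 1) + 1 := by omega
        rw [this, pow_succ]; ring
      have hpow3o : (3 : Int) ^ (PySem.Int.bitLength (2 * m + 1) - 1) =
          3 * 3 ^ (PySem.Int.bitLength m - 1) := by
        rw [hbLo]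
        have : PySem.Int.bitLength m + 1 - 1 = (PySem.Int.bitLength m - 1) + 1 := by omega
        rw [this, pow_succ]; ring
      have hstepm := msbSum_step m hm1
      constructor
      · -- even
        intro _
        rw [msbSum_step (2 * m) (by omega), hpowe, hpow3e]
        have harg : 2 * m - 2 * 2 ^ (PySem.Int.bitLength m - 1) = 2 * rm := by
          rw [hrm]; ring
        rw [harg]
        by_cases hrz : rm = 0
        · rw [hrz, show (2:Int) * 0 = 0 by ring, msbSum_nonpos 0 (by norm_num)]
          rw [hstepm, ← hrm, hrz, msbSum_nonpos 0 (by norm_num)]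
          ring
        · have : msbSum (2 * rm) = 3 * msbSum rm :=
            (ih rm (by omega)).1 (by omega)
          rw [this, hstepm, ← hrm]
          ring
      · -- odd
        intro _
        rw [msbSum_step (2 * m + 1) (by omega), hpowo, hpow3o]
        have harg : 2 * m + 1 - 2 * 2 ^ (PySem.Int.bitLength m - 1) = 2 * rm + 1 := by
          rw [hrm]; ring
        rw [harg]
        have hodd : msbSum (2 * rm + 1) = 3 * msbSum rm + 2 ^ (pcI rm) :=
          (ih rm (by omega)).2 hrm0
        have hpcm : pcI m = pcI rm + 1 := pc_msb m hm1
        rw [hodd, hstepm, ← hrm, hpcm, pow_succ]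
        ring

theorem msbSum_even (m : Int) (h : 1 ≤ m) : msbSum (2 * m) = 3 * msbSum m :=
  (msbSum_even_odd_aux m.toNat m le_rfl).1 h

theorem msbSum_odd (m : Int) (h : 0 ≤ m) :
    msbSum (2 * m + 1) = 3 * msbSum m + 2 ^ (pcI m) :=
  (msbSum_even_odd_aux m.toNat m le_rfl).2 h

theorem main_eq_aux (k : Nat) :
    ∀ n : Int, n.toNat ≤ k → WI (digitsA n) = msbSum n := by
  induction k with
  | zero =>
    intro n hk
    have hn1 : n < 1 := by omega
    rw [digitsA_small n (by omega), msbSum_nonpos n hn1]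
    simp [WI]
    omega
  | succ k ih =>
    intro n hk
    by_cases hn2 : n < 2
    · by_cases hn1 : n = 1
      · subst hn1
        rw [digitsA_small 1 (by norm_num)]
        have : WI [(1:Int)] = 1 := by simp [WI]
        rw [this, msbSum_step 1 (by norm_num)]
        have hb : PySem.Int.bitLength (1 : Int) = 1 := by decide
        rw [hb]
        norm_num
        exact msbSum_nonpos 0 (by norm_num)
      · rw [digitsA_small n hn2, msbSum_nonpos n (by omega)]
        simp [WI]
        omega
    · set q := PySem.Int.floordiv n 2 with hq
      set b := PySem.Int.mod n 2 with hb
      obtain ⟨hsum, hb0, hb1⟩ := divmod2 n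
      have hq1 : 1 ≤ q := by omega
      rw [digitsA_rec n (by omega), ← hq, ← hb, WI_append]
      have hihq : WI (digitsA q) = msbSum q := ih q (by omega)
      rw [hihq]
      by_cases hbo : b = 1
      · have hn' : n = 2 * q + 1 := by omega
        rw [hbo, if_pos rfl, hn', msbSum_odd q (by omega)]
        rfl
      · have hbz : b = 0 := by omega
        have hn' : n = 2 * q := by omega
        rw [if_neg hbo, hn', msbSum_even q hq1]
        ring

theorem main_eq (n : Int) : WI (digitsA n) = msbSum n :=
  main_eq_aux n.toNat n le_rfl

-- ===== VERDICT (by name: the statement is the Claim_ definition above) =====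
theorem F_spec : Claim_equal_F := by
  intro m _
  unfold Spec_F F F_alt
  simp only
  rw [loop_eq]
  simp [main_eq]
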